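-- pv_equiv track=rewrite | github.com/FRBs/FRB | papers/Kilpatrick2024_Alopeke/Tables/py/UTILS.py | check_objects_in_region
-- ===== SOURCE A (Python) =====
-- def check_objects_in_region(image, objects, xmin, xmax, ymin, ymax):
-- 	all_objects = objects
-- 	bool_aux = False
-- 	for x,y in zip(all_objects['x'],all_objects['y']):
-- 		cond = (xmin < x < xmax) & (ymin < y < ymax)
-- 		if cond:
-- 			bool_aux = True
-- 			# maskeo de estrella brillante
-- 			cond2 = (178 < x < 190) & (189 < y < 201)
-- 			if cond2:
-- 				bool_aux = False
-- 				break
-- 	return bool_aux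
-- ===== SOURCE B (Python) =====
-- def check_objects_in_region(image, objects, xmin, xmax, ymin, ymax):
--     pts = list(zip(objects['x'], objects['y']))
--     in_region = any(xmin < x < xmax and ymin < y < ymax for x, y in pts)
--     in_star = any(xmin < x < xmax and ymin < y < ymax
--                   and 178 < x < 190 and 189 < y < 201 for x, y in pts)
--     return in_region and not in_star
-- ===== Notes on version B (the rewrite author's own statement) =====
-- stated objective: simpler
-- what changed: Replaces the flag-mutating early-break loop by two declarative any-scans (any object in region, any in-region object in the star box) combined as in_region and not in_star.
import Mathlib
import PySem

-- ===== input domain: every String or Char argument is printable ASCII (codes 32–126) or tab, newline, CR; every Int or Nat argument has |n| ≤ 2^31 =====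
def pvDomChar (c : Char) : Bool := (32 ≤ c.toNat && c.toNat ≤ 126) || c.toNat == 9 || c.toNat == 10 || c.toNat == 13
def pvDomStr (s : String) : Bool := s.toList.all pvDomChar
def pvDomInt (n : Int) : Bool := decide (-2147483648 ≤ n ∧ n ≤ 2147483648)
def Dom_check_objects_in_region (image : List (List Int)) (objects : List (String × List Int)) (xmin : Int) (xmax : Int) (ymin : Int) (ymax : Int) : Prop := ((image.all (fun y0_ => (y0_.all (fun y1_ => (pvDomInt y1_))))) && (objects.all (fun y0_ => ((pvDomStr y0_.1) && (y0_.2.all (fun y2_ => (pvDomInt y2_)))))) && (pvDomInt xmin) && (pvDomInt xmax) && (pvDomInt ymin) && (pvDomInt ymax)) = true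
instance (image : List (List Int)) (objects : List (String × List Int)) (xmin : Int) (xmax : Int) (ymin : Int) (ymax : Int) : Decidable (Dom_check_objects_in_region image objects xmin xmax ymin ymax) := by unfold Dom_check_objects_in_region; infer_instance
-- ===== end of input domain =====

-- B replaces A's flag-mutating early-break loop by two declarative any-scans
-- (any object in region; any in-region object in the star box) combined as
-- in_region && !in_star. Return-value equivalence only; neither mutates inputs.

-- ===== PORT A =====
-- the for-loop with its mutable bool_aux flag and the break on the star box
def coirLoop (xmin xmax ymin ymax : Int) : List (Int × Int) → Bool → Bool
  | [], b => b
  | (x, y) :: rest, b =>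
    if xmin < x ∧ x < xmax ∧ ymin < y ∧ y < ymax then
      if (178 : Int) < x ∧ x < 190 ∧ (189 : Int) < y ∧ y < 201 then
        false  -- bool_aux = False; break
      else coirLoop xmin xmax ymin ymax rest true
    else coirLoop xmin xmax ymin ymax rest b

def check_objects_in_region (image : List (List Int)) (objects : List (String × List Int)) (xmin : Int) (xmax : Int) (ymin : Int) (ymax : Int) : Bool :=
  match objects.lookup "x", objects.lookup "y" with
  | some xs, some ys => coirLoop xmin xmax ymin ymax (xs.zip ys) false
  | _, _ => false  -- Python raises KeyError here; excluded by Pre_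

-- ===== PORT B =====
def check_objects_in_region_alt (image : List (List Int)) (objects : List (String × List Int)) (xmin : Int) (xmax : Int) (ymin : Int) (ymax : Int) : Bool :=
  match (objects.lookup "x").bind (fun xs => (objects.lookup "y").map (fun ys => (xs, ys))) with
  | some (xs, ys) =>
    let pts := xs.zip ys
    let inRegion := pts.any (fun p => decide (xmin < p.1 ∧ p.1 < xmax ∧ ymin < p.2 ∧ p.2 < ymax))
    let inStar := pts.any (fun p => decide (xmin < p.1 ∧ p.1 < xmax ∧ ymin < p.2 ∧ p.2 < ymax ∧
                    (178 : Int) < p.1 ∧ p.1 < 190 ∧ (189 : Int) < p.2 ∧ p.2 < 201))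
    inRegion && !inStar
  | none => false

-- ===== PRECONDITION & SPEC =====
-- Pre_ excludes exactly the inputs where the Python A raises KeyError:
-- the objects dict must carry both an 'x' and a 'y' entry.
def Pre_check_objects_in_region (image : List (List Int)) (objects : List (String × List Int)) (xmin : Int) (xmax : Int) (ymin : Int) (ymax : Int) : Prop :=
  (objects.lookup "x").isSome ∧ (objects.lookup "y").isSome
instance (image : List (List Int)) (objects : List (String × List Int)) (xmin : Int) (xmax : Int) (ymin : Int) (ymax : Int) : Decidable (Pre_check_objects_in_region image objects xmin xmax ymin ymax) := by unfold Pre_check_objects_in_region; infer_instance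

def pvWitness_check_objects_in_region : List (List Int) × (List (String × List Int)) × Int × Int × Int × Int :=
  ([], [("x", [5, 180]), ("y", [5, 195])], 0, 300, 0, 300)

def Spec_check_objects_in_region (image : List (List Int)) (objects : List (String × List Int)) (xmin : Int) (xmax : Int) (ymin : Int) (ymax : Int) (out : Bool) : Prop := out = check_objects_in_region_alt image objects xmin xmax ymin ymax
instance (image : List (List Int)) (objects : List (String × List Int)) (xmin : Int) (xmax : Int) (ymin : Int) (ymax : Int) (out : Bool) : Decidable (Spec_check_objects_in_region image objects xmin xmax ymin ymax out) := by unfold Spec_check_objects_in_region; infer_instance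

-- ===== CLAIM (what is proved, stated in full; the proofs are below) =====
def Claim_equal_check_objects_in_region : Prop := ∀ (image : List (List Int)) (objects : List (String × List Int)) (xmin : Int) (xmax : Int) (ymin : Int) (ymax : Int), Dom_check_objects_in_region image objects xmin xmax ymin ymax → Pre_check_objects_in_region image objects xmin xmax ymin ymax → Spec_check_objects_in_region image objects xmin xmax ymin ymax (check_objects_in_region image objects xmin xmax ymin ymax)

-- ===== LEMMAS AND PROOFS =====
-- the break-loop equals "flag OR some point in region, AND no in-region point in the star box"
theorem coirLoop_eq (xmin xmax ymin ymax : Int) (l : List (Int × Int)) (b : Bool) :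
    coirLoop xmin xmax ymin ymax l b =
      ((b || l.any (fun p => decide (xmin < p.1 ∧ p.1 < xmax ∧ ymin < p.2 ∧ p.2 < ymax))) &&
       !(l.any (fun p => decide (xmin < p.1 ∧ p.1 < xmax ∧ ymin < p.2 ∧ p.2 < ymax ∧
          (178 : Int) < p.1 ∧ p.1 < 190 ∧ (189 : Int) < p.2 ∧ p.2 < 201)))) := by
  induction l generalizing b with
  | nil => simp [coirLoop]
  | cons p rest ih =>
    obtain ⟨x, y⟩ := p
    by_cases h1 : xmin < x ∧ x < xmax ∧ ymin < y ∧ y < ymax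
    · by_cases h2 : (178 : Int) < x ∧ x < 190 ∧ (189 : Int) < y ∧ y < 201
      · have hs : decide (xmin < x ∧ x < xmax ∧ ymin < y ∧ y < ymax ∧
            (178 : Int) < x ∧ x < 190 ∧ (189 : Int) < y ∧ y < 201) = true :=
          decide_eq_true ⟨h1.1, h1.2.1, h1.2.2.1, h1.2.2.2, h2.1, h2.2.1, h2.2.2.1, h2.2.2.2⟩
        rw [coirLoop, if_pos h1, if_pos h2]
        simp only [List.any_cons, hs, Bool.true_or, Bool.not_true, Bool.and_false]
      · have hr : decide (xmin < x ∧ x < xmax ∧ ymin < y ∧ y < ymax) = true := decide_eq_true h1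
        have hs : decide (xmin < x ∧ x < xmax ∧ ymin < y ∧ y < ymax ∧
            (178 : Int) < x ∧ x < 190 ∧ (189 : Int) < y ∧ y < 201) = false :=
          decide_eq_false (fun h => h2 ⟨h.2.2.2.2.1, h.2.2.2.2.2.1, h.2.2.2.2.2.2.1, h.2.2.2.2.2.2.2⟩)
        rw [coirLoop, if_pos h1, if_neg h2, ih]
        simp only [List.any_cons, hr, hs, Bool.true_or, Bool.or_true, Bool.false_or, Bool.true_and]
    · have hr : decide (xmin < x ∧ x < xmax ∧ ymin < y ∧ y < ymax) = false := decide_eq_false h1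
      have hs : decide (xmin < x ∧ x < xmax ∧ ymin < y ∧ y < ymax ∧
          (178 : Int) < x ∧ x < 190 ∧ (189 : Int) < y ∧ y < 201) = false :=
        decide_eq_false (fun h => h1 ⟨h.1, h.2.1, h.2.2.1, h.2.2.2.1⟩)
      rw [coirLoop, if_neg h1, ih]
      simp only [List.any_cons, hr, hs, Bool.false_or]

-- ===== VERDICT (by name: the statement is the Claim_ definition above) =====
theorem check_objects_in_region_spec : Claim_equal_check_objects_in_region := by
  intro image objects xmin xmax ymin ymax _ hpre
  obtain ⟨hx, hy⟩ := hpre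
  unfold Spec_check_objects_in_region check_objects_in_region check_objects_in_region_alt
  obtain ⟨xs, hxs⟩ := Option.isSome_iff_exists.mp hx
  obtain ⟨ys, hys⟩ := Option.isSome_iff_exists.mp hy
  simp only [hxs, hys, Option.bind_some, Option.map_some]
  exact coirLoop_eq xmin xmax ymin ymax (xs.zip ys) false
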